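-- pv_equiv track=rewrite | github.com/FarazNadeem22/LeetCodeProblems | easyProblems/questionTwo/solutionTwo.py | reverseDigits
-- ===== SOURCE A (Python) =====
-- def reverseDigits(number:int) -> int:
--     numDigits = len(str(number))//2
--     reversedNum = 0
--
--     powerOfTen = 10 ** numDigits
--     digit = number % powerOfTen
--
--     # Reverse this
--     while digit != 0:
--         number = digit % 10
--         reversedNum = reversedNum * 10 + number
--         digit = digit //10
--
--     return reversedNum
-- ===== SOURCE B (Python) =====
-- def reverseDigits(number: int) -> int:
--     powerOfTen = 10 ** (len(str(number)) // 2)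
--     return sum(int(c) * 10 ** i for i, c in enumerate(str(number % powerOfTen)))
-- ===== Notes on version B (the rewrite author's own statement) =====
-- stated objective: alternative
-- what changed: The digit-reversal while-loop with a numeric accumulator (repeated %10 and //10) is replaced by a closed positional sum over the decimal string of the lower part: sum(int(c) * 10**i for i, c in enumerate(str(number % powerOfTen))).
import Mathlib
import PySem

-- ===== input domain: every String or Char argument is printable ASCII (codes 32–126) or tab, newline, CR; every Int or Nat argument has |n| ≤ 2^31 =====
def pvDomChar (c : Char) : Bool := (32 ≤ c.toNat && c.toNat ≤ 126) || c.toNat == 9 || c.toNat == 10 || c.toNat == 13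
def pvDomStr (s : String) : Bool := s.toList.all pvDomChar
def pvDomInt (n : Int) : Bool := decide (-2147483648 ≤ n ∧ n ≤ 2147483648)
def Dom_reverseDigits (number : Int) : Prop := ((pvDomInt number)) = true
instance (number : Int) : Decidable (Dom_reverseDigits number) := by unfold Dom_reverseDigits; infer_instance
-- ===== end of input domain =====

-- B replaces A's arithmetic accumulator while-loop by a closed positional sum over the decimal
-- string's characters (objective: alternative representation, same cost).

-- ===== PORT A =====
-- the while-loop: digit is always ≥ 0 here (it starts as number % 10^k with 10^k > 0),
-- so the loop state is carried as a Nat, exactly Python's repeated //10, %10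
def revLoop (digit : Nat) (reversedNum : Int) : Int :=
  if digit = 0 then reversedNum
  else revLoop (digit / 10) (reversedNum * 10 + (digit % 10 : Nat))
termination_by digit
decreasing_by exact Nat.div_lt_self (Nat.pos_of_ne_zero (by assumption)) (by omega)

def reverseDigits (number : Int) : Int :=
  -- numDigits = len(str(number)) // 2 : both sides nonnegative, so Nat division is Python's //
  let numDigits : Nat := (PySem.Int.toChars number).length / 2
  let powerOfTen : Int := 10 ^ numDigits
  let digit : Int := PySem.Int.mod number powerOfTen
  revLoop digit.toNat 0

-- ===== PORT B =====
def reverseDigits_alt (number : Int) : Int :=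
  let powerOfTen : Int := 10 ^ ((PySem.Int.toChars number).length / 2)
  -- sum(int(c) * 10 ** i for i, c in enumerate(str(number % powerOfTen)))
  -- int(c) never raises here (every c is a decimal digit char), hence .getD 0;
  -- the enumerate index i is ≥ 0, hence .toNat for the exponent
  (PySem.List.enumerate (PySem.Int.toChars (PySem.Int.mod number powerOfTen)) 0).foldl
    (fun acc ic => acc + (PySem.Int.ofChars? [ic.2]).getD 0 * 10 ^ ic.1.toNat) 0

-- ===== PRECONDITION & SPEC =====
def Spec_reverseDigits (number : Int) (out : Int) : Prop := out = reverseDigits_alt number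
instance (number : Int) (out : Int) : Decidable (Spec_reverseDigits number out) := by unfold Spec_reverseDigits; infer_instance

-- ===== CLAIM (what is proved, stated in full; the proofs are below) =====
def Claim_equal_reverseDigits : Prop := ∀ (number : Int), Dom_reverseDigits number → Spec_reverseDigits number (reverseDigits number)

-- ===== LEMMAS AND PROOFS =====

-- value of int(c) on a single decimal digit char
lemma intOfDigitChar (d : Nat) (hd : d < 10) :
    (PySem.Int.ofChars? [Nat.digitChar d]).getD 0 = (d : Int) := by
  interval_cases d <;> decide

-- ofD: value of an LSB-first digit list
def ofD (L : List Nat) : Int := L.foldr (fun (d : Nat) (r : Int) => (d : Int) + 10 * r) 0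

-- gsum: positional value of a char list, int(c) per char
def gsum (cs : List Char) : Int :=
  cs.foldr (fun c r => (PySem.Int.ofChars? [c]).getD 0 + 10 * r) 0

lemma ofD_append_singleton (L : List Nat) (d : Nat) :
    ofD (L ++ [d]) = ofD L + (d : Int) * 10 ^ L.length := by
  induction L with
  | nil => simp [ofD]
  | cons x L ih => simp [ofD] at ih ⊢; rw [ih]; ring

-- A's loop = foldl over the LSB-first digits
lemma revLoop_eq_foldl (n : Nat) (acc : Int) :
    revLoop n acc = (Nat.digits 10 n).foldl (fun (a : Int) (d : Nat) => a * 10 + (d : Int)) acc := by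
  induction n using Nat.strong_induction_on generalizing acc with
  | _ n ih =>
    by_cases h : n = 0
    · subst h; simp [revLoop]
    · rw [revLoop, if_neg h, Nat.digits_def' (by omega) (Nat.pos_of_ne_zero h), List.foldl_cons]
      exact ih (n / 10) (Nat.div_lt_self (Nat.pos_of_ne_zero h) (by omega)) _

lemma foldl_eq_ofD_reverse (L : List Nat) (acc : Int) :
    L.foldl (fun (a : Int) (d : Nat) => a * 10 + (d : Int)) acc = acc * 10 ^ L.length + ofD L.reverse := by
  induction L generalizing acc with
  | nil => simp [ofD]
  | cons d L ih =>
    rw [List.foldl_cons, ih, List.reverse_cons, ofD_append_singleton]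
    simp [pow_succ]; ring

-- B's foldl over enumerate = gsum, shifted by the start index
lemma foldl_enumerate_eq_gsum (cs : List Char) (k : Nat) (acc : Int) :
    (PySem.List.enumerate cs (k : Int)).foldl
      (fun acc ic => acc + (PySem.Int.ofChars? [ic.2]).getD 0 * 10 ^ ic.1.toNat) acc
      = acc + 10 ^ k * gsum cs := by
  induction cs generalizing k acc with
  | nil => simp [PySem.List.enumerate_nil, gsum]
  | cons c cs ih =>
    rw [PySem.List.enumerate_cons, List.foldl_cons]
    have hk1 : (k : Int) + 1 = ((k + 1 : Nat) : Int) := by push_cast; ring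
    rw [hk1, ih]
    simp [gsum, Int.toNat_natCast, pow_succ]
    ring

lemma foldl_enumerate_zero (cs : List Char) (acc : Int) :
    (PySem.List.enumerate cs 0).foldl
      (fun acc ic => acc + (PySem.Int.ofChars? [ic.2]).getD 0 * 10 ^ ic.1.toNat) acc
      = acc + gsum cs := by
  simpa using foldl_enumerate_eq_gsum cs 0 acc

-- gsum on digit chars is ofD
lemma gsum_map_digitChar (M : List Nat) (h : ∀ d ∈ M, d < 10) :
    gsum (M.map Nat.digitChar) = ofD M := by
  induction M with
  | nil => simp [gsum, ofD]
  | cons d M ih =>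
    simp only [List.map_cons, gsum, ofD, List.foldr_cons]
    rw [intOfDigitChar d (h d (by simp))]
    have := ih (fun d hd => h d (by simp [hd]))
    simp [gsum, ofD] at this; rw [this]

-- Nat.toDigits 10 n is the digits of n, MSB first, as chars (n > 0)
lemma toDigitsCore_eq (f : Nat) : ∀ (n : Nat) (ds : List Char), 0 < n → n < f →
    Nat.toDigitsCore 10 f n ds = ((Nat.digits 10 n).map Nat.digitChar).reverse ++ ds := by
  induction f with
  | zero => intro n ds h1 h2; omega
  | succ f ih =>
    intro n ds h1 h2
    rw [Nat.toDigitsCore]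
    by_cases h : n / 10 = 0
    · rw [if_pos h, Nat.digits_def' (by omega) h1, h, Nat.digits_zero]
      simp
    · rw [if_neg h, ih (n / 10) _ (Nat.pos_of_ne_zero h)
        (by have := Nat.div_lt_self h1 (by omega : (1:Nat) < 10); omega)]
      rw [Nat.digits_def' (by omega) h1]
      simp

lemma toDigits_eq (n : Nat) (h : n ≠ 0) :
    Nat.toDigits 10 n = ((Nat.digits 10 n).map Nat.digitChar).reverse := by
  rw [Nat.toDigits, toDigitsCore_eq (n + 1) n [] (Nat.pos_of_ne_zero h) (by omega)]
  simp

-- toChars of a nonnegative Int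
lemma toChars_nonneg (m : Int) (h : 0 ≤ m) :
    PySem.Int.toChars m = Nat.toDigits 10 m.toNat := by
  simp [PySem.Int.toChars, not_lt.mpr h]

-- the core equality, for the (always nonnegative) lower part
lemma main_eq (m : Int) (hm : 0 ≤ m) :
    revLoop m.toNat 0 =
      (PySem.List.enumerate (PySem.Int.toChars m) 0).foldl
        (fun acc ic => acc + (PySem.Int.ofChars? [ic.2]).getD 0 * 10 ^ ic.1.toNat) 0 := by
  rw [toChars_nonneg m hm]
  rw [foldl_enumerate_zero]
  set n := m.toNat with hn
  by_cases h : n = 0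
  · rw [h, revLoop]; decide
  · rw [toDigits_eq n h, ← List.map_reverse,
      gsum_map_digitChar _ (fun d hd => Nat.digits_lt_base (by omega) (List.mem_reverse.mp hd)),
      revLoop_eq_foldl, foldl_eq_ofD_reverse]
    simp [ofD]

-- ===== VERDICT (by name: the statement is the Claim_ definition above) =====
theorem reverseDigits_spec : Claim_equal_reverseDigits := by
  intro number _
  unfold Spec_reverseDigits reverseDigits reverseDigits_alt
  exact main_eq _ (PySem.Int.mod_nonneg _ (by positivity))
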